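-- pv_equiv track=rewrite | github.com/didghwns0514/SWEA-PS | 삼성/SWEA/(2) 보호 필름/main.py | checkTestPass3
-- ===== SOURCE A (Python) =====
-- def checkTestPass3(dataFilm, K, D):
--
-- 	dataResult = []
-- 	for idxCol in range(len(dataFilm[0])):
-- 		filmList = [ dataFilm[idxRow][idxCol] for idxRow in range(len(dataFilm)) ]
-- 		filteredTemp = [ len(set(filmList[idxData:idxData+K])) == 1  for idxData, valData in enumerate(filmList)
-- 						 if idxData <= D-1-K + 1 ]
-- 		if any(filteredTemp):
-- 			dataResult.append(True)
-- 		else: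
-- 			dataResult.append(False)
--
-- 	if all(dataResult):
-- 		return True
-- 	else:
-- 		return False
-- ===== SOURCE B (Python) =====
-- # B: per column, compute run lengths (length of the equal-valued run starting at
-- # each row) in one bottom-up pass, then check for a window start i <= D-K whose
-- # run reaches min(K, n-i); O(W*D) instead of A's O(W*D*K) set-building windows.
-- def checkTestPass3(dataFilm, K, D):
--     n = len(dataFilm)
--     for c in range(len(dataFilm[0])):
--         col = [row[c] for row in dataFilm]
--         runs = [1] * n
--         for i in range(n - 2, -1, -1):
--             if col[i] == col[i + 1]:
--                 runs[i] = runs[i + 1] + 1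
--         if not any(i <= D - K and runs[i] >= min(K, n - i) for i in range(n)):
--             return False
--     return True
-- ===== Notes on version B (the rewrite author's own statement) =====
-- stated objective: faster
-- what changed: Instead of building a Python set of every K-window of every column (O(W*D*K)), B computes per column the run length of equal values starting at each row in one bottom-up pass and compares it to min(K, n-i) at each admissible window start (O(W*D)).
-- outside the precondition, e.g. on checkTestPass3([[1], [1]], -2, 2): A returns False, B returns True
import Mathlib
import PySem

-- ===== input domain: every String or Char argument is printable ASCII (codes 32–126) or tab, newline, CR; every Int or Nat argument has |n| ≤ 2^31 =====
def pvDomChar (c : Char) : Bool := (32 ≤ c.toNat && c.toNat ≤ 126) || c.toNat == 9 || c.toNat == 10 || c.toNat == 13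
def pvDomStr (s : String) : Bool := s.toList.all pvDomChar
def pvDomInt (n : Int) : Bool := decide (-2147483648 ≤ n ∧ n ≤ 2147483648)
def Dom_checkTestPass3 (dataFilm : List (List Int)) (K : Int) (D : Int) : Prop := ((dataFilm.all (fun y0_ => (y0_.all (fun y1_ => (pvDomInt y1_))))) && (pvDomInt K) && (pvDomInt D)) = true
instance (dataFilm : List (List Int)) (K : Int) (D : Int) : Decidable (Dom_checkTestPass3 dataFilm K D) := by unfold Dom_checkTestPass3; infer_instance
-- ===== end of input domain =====

-- B replaces A's per-window set construction by one bottom-up run-length pass per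
-- column (asymptotically faster as measured); A = B on non-empty rectangular-enough
-- inputs with K ≥ 1.


-- ===== PORT A =====
def checkTestPass3 (dataFilm : List (List Int)) (K : Int) (D : Int) : Bool :=
  let dataResult := (List.range (dataFilm.headD []).length).map (fun idxCol =>
    let filmList := (List.range dataFilm.length).map
      (fun idxRow => (dataFilm.getD idxRow []).getD idxCol 0)
    let filteredTemp := ((PySem.List.enumerate filmList 0).filter
        (fun p => decide (p.1 ≤ D - 1 - K + 1))).map
      (fun p => decide ((PySem.Set.ofList
          (PySem.List.slice filmList (some p.1) (some (p.1 + K)))).length = 1))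
    if filteredTemp.any id then true else false)
  if dataResult.all id then true else false

-- ===== PORT B =====
-- run lengths: runsOf l [i] = length of the maximal equal-valued run starting at i
-- (the Python fills the array right-to-left; this is the same computation as
-- structural recursion on the list)
def runsOf : List Int → List Int
  | [] => []
  | x :: t =>
    let r := runsOf t
    match t with
    | [] => [1]
    | y :: _ => (if x == y then r.headD 0 + 1 else 1) :: r

def checkTestPass3_alt (dataFilm : List (List Int)) (K : Int) (D : Int) : Bool :=
  let n := dataFilm.length
  (List.range (dataFilm.headD []).length).all (fun c =>
    let col := dataFilm.map (fun row => row.getD c 0)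
    let runs := runsOf col
    (List.range n).any (fun i =>
      decide ((i : Int) ≤ D - K ∧ runs.getD i 0 ≥ min K ((n : Int) - (i : Int)))))

-- ===== PRECONDITION & SPEC =====
-- Pre_ excludes: empty dataFilm and rows shorter than row 0 (A raises IndexError
-- there), and K ≤ 0, where A's window dataFilm[i:i+K] is empty or wraps around via
-- Python's negative-slice rule, an accident of A's slicing outside the natural
-- domain of a thickness check.
def Pre_checkTestPass3 (dataFilm : List (List Int)) (K : Int) (D : Int) : Prop :=
  dataFilm ≠ [] ∧ (∀ row ∈ dataFilm, (dataFilm.headD []).length ≤ row.length) ∧ 1 ≤ K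
instance (dataFilm : List (List Int)) (K : Int) (D : Int) : Decidable (Pre_checkTestPass3 dataFilm K D) := by unfold Pre_checkTestPass3; infer_instance

def pvWitness_checkTestPass3 : List (List Int) × Int × Int := ([[1, 2], [1, 3]], 2, 2)

def Spec_checkTestPass3 (dataFilm : List (List Int)) (K : Int) (D : Int) (out : Bool) : Prop := out = checkTestPass3_alt dataFilm K D
instance (dataFilm : List (List Int)) (K : Int) (D : Int) (out : Bool) : Decidable (Spec_checkTestPass3 dataFilm K D out) := by unfold Spec_checkTestPass3; infer_instance

-- ===== CLAIM (what is proved, stated in full; the proofs are below) =====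
def Claim_equal_checkTestPass3 : Prop := ∀ (dataFilm : List (List Int)) (K : Int) (D : Int), Dom_checkTestPass3 dataFilm K D → Pre_checkTestPass3 dataFilm K D → Spec_checkTestPass3 dataFilm K D (checkTestPass3 dataFilm K D)

-- ===== LEMMAS AND PROOFS =====

theorem ifTF (b : Bool) : (if b = true then true else false) = b := by cases b <;> simp

-- rhead l = run length of the maximal equal-valued run at the head of l
def rhead (l : List Int) : Int := (runsOf l).headD 0

theorem runsOf_cons (x : Int) (t : List Int) :
    runsOf (x :: t) =
      (match t with
       | [] => (1 : Int)
       | y :: _ => if x == y then (runsOf t).headD 0 + 1 else 1) :: runsOf t := by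
  cases t <;> simp [runsOf]

theorem rhead_pos (x : Int) (t : List Int) : 1 ≤ rhead (x :: t) := by
  induction t generalizing x with
  | nil => simp [rhead, runsOf]
  | cons y t' ih =>
    have h := ih y
    rw [rhead, runsOf_cons]
    by_cases hxy : x = y <;> simp [hxy, rhead] at h ⊢ <;> omega

theorem runsOf_getD_eq (l : List Int) (k : Nat) (hk : k < l.length) :
    (runsOf l).getD k 0 = rhead (l.drop k) := by
  induction l generalizing k with
  | nil => simp at hk
  | cons x t ih =>
    cases k with
    | zero =>
      cases hr : runsOf (x :: t) with
      | nil => simp [rhead, hr, List.getD]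
      | cons a s => simp [rhead, hr, List.getD]
    | succ k =>
      rw [runsOf_cons]
      simp only [List.drop_succ_cons, List.getD_cons_succ]
      exact ih k (by simpa using hk)

theorem head_uniform_iff (x : Int) (t : List Int) (m : Nat) (hm : 1 ≤ m) :
    (∀ y ∈ (x :: t).take m, y = x) ↔
      min (m : Int) ((t.length : Int) + 1) ≤ rhead (x :: t) := by
  induction t generalizing x m with
  | nil =>
    have hta : (x :: ([] : List Int)).take m = [x] := by
      cases m with
      | zero => omega
      | succ m => simp
    simp [hta, rhead, runsOf]
    try omega
  | cons y t' ih =>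
    have hpos := rhead_pos y t'
    rcases Nat.lt_or_ge m 2 with hm1 | hm2
    · -- m = 1
      have hm1' : m = 1 := by omega
      subst hm1'
      have hp := rhead_pos x (y :: t')
      simp only [List.take_succ_cons, List.take_zero]
      constructor
      · intro _
        simp
        try omega
      · intro _ z hz
        simp at hz
        simp [hz]
    · -- 2 ≤ m
      obtain ⟨m', rfl⟩ : ∃ m', m = m' + 1 := ⟨m - 1, by omega⟩
      have hm' : 1 ≤ m' := by omega
      by_cases hxy : x = y
      · subst hxy
        have hIH := ih x m' hm'
        have hr : rhead (x :: x :: t') = rhead (x :: t') + 1 := by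
          rw [rhead, runsOf_cons]
          simp [rhead]
        rw [hr]
        constructor
        · intro h
          have h' : ∀ y ∈ (x :: t').take m', y = x := by
            intro z hz
            apply h
            simp only [List.take_succ_cons, List.mem_cons]
            right; exact hz
          have := hIH.mp h'
          simp only [List.length_cons]
          push_cast
          omega
        · intro h
          have h' : min (m' : Int) ((t'.length : Int) + 1) ≤ rhead (x :: t') := by
            simp only [List.length_cons] at h
            push_cast at h
            omega
          have := hIH.mpr h'
          intro z hz
          simp only [List.take_succ_cons, List.mem_cons] at hz
          rcases hz with rfl | hz
          · rfl
          · exact this z hz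
      · -- x ≠ y : left side false, right side false
        have hr : rhead (x :: y :: t') = 1 := by
          rw [rhead, runsOf_cons]
          simp [hxy]
        rw [hr]
        constructor
        · intro h
          exfalso
          apply hxy
          have hy : y ∈ (x :: y :: t').take (m' + 1) := by
            obtain ⟨m'', rfl⟩ : ∃ m'', m' = m'' + 1 := ⟨m' - 1, by omega⟩
            simp
          exact (h y hy).symm
        · intro h
          exfalso
          simp only [List.length_cons] at h
          push_cast at h
          omega

theorem setLen_one_iff (x : Int) (t : List Int) :
    (PySem.Set.ofList (x :: t)).length = 1 ↔ ∀ y ∈ t, y = x := by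
  rw [PySem.Set.ofList_cons]
  have hd : ∀ y : Int, y ∈ PySem.Set.discard (PySem.Set.ofList t) x ↔ (y ∈ t ∧ y ≠ x) := by
    intro y
    rw [PySem.Set.mem_discard, PySem.Set.mem_ofList]
  constructor
  · intro h y hy
    have hlen : (PySem.Set.discard (PySem.Set.ofList t) x).length = 0 := by simpa using h
    have hnil : PySem.Set.discard (PySem.Set.ofList t) x = [] := List.length_eq_zero_iff.mp hlen
    by_contra hne
    have : y ∈ PySem.Set.discard (PySem.Set.ofList t) x := (hd y).mpr ⟨hy, hne⟩
    simp [hnil] at this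
  · intro h
    have hnil : PySem.Set.discard (PySem.Set.ofList t) x = [] := by
      rw [List.eq_nil_iff_forall_not_mem]
      intro y hy
      exact ((hd y).mp hy).2 (h y ((hd y).mp hy).1)
    simp [hnil]

-- the K-window at k is uniform iff the run at k reaches min(K, n-k)
theorem window_iff (col : List Int) (K : Int) (hK : 1 ≤ K) (k : Nat) (hk : k < col.length) :
    ((PySem.Set.ofList (PySem.List.slice col (some (k : Int)) (some ((k : Int) + K)))).length = 1
      ↔ min K ((col.length : Int) - (k : Int)) ≤ (runsOf col).getD k 0) := by
  have hsl : PySem.List.slice col (some (k : Int)) (some ((k : Int) + K)) =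
      (col.drop k).take K.toNat := by
    rw [PySem.List.slice_toNat col (by positivity) (by omega)]
    congr 1
    omega
  rw [hsl, runsOf_getD_eq col k hk]
  cases hdrop : col.drop k with
  | nil =>
    exfalso
    have hl := List.length_drop (l := col) (i := k)
    rw [hdrop] at hl
    simp at hl
    omega
  | cons x t =>
    have hlen : t.length + 1 = col.length - k := by
      have hl := List.length_drop (l := col) (i := k)
      rw [hdrop] at hl
      simp at hl
      omega
    have hm : 1 ≤ K.toNat := by omega
    have hKt : ((K.toNat : Nat) : Int) = K := by omega
    obtain ⟨m', hm'⟩ : ∃ m', K.toNat = m' + 1 := ⟨K.toNat - 1, by omega⟩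
    constructor
    · intro h
      have huni : ∀ y ∈ (x :: t).take K.toNat, y = x := by
        rw [hm', List.take_succ_cons] at h ⊢
        have hall := (setLen_one_iff x (t.take m')).mp h
        intro y hy
        rcases List.mem_cons.mp hy with rfl | hy
        · rfl
        · exact hall y hy
      have hres := (head_uniform_iff x t K.toNat hm).mp huni
      rw [hKt] at hres
      omega
    · intro h
      have h' : min ((K.toNat : Nat) : Int) ((t.length : Int) + 1) ≤ rhead (x :: t) := by
        rw [hKt]
        omega
      have huni := (head_uniform_iff x t K.toNat hm).mpr h'
      rw [hm', List.take_succ_cons] at huni ⊢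
      apply (setLen_one_iff x (t.take m')).mpr
      intro y hy
      exact huni y (List.mem_cons_of_mem x hy)

-- A's index loop over rows extracts the same column as B's map over rows
theorem colA_eq (l : List (List Int)) (c : Nat) :
    (List.range l.length).map (fun r => (l.getD r []).getD c 0) =
      l.map (fun row => row.getD c 0) := by
  induction l with
  | nil => simp
  | cons a t ih =>
    simp only [List.length_cons, List.range_succ_eq_map, List.map_cons, List.map_map]
    rw [← ih]
    rfl

theorem col_eq (col : List Int) (K D : Int) (hK : 1 ≤ K) :
    (((PySem.List.enumerate col).filter (fun p => decide (p.1 ≤ D - 1 - K + 1))).map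
        (fun p => decide ((PySem.Set.ofList
          (PySem.List.slice col (some p.1) (some (p.1 + K)))).length = 1))).any id
    = (List.range col.length).any (fun i =>
        decide ((i : Int) ≤ D - K ∧ (runsOf col).getD i 0 ≥ min K ((col.length : Int) - (i : Int)))) := by
  rw [Bool.eq_iff_iff]
  simp only [List.any_map, List.any_filter, List.any_eq_true, Function.comp,
    PySem.List.mem_enumerate_iff, List.mem_range, Bool.and_eq_true, decide_eq_true_eq, id_eq]
  constructor
  · rintro ⟨p, ⟨k, hk, rfl⟩, hle, hset⟩
    simp only [zero_add] at hle hset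
    refine ⟨k, hk, by omega, ?_⟩
    exact (window_iff col K hK k hk).mp hset
  · rintro ⟨k, hk, hle, hrun⟩
    refine ⟨((k : Int), col[k]), ⟨k, hk, by simp⟩, by simpa using (by omega : (k : Int) ≤ D - 1 - K + 1), ?_⟩
    simpa using (window_iff col K hK k hk).mpr hrun

-- ===== VERDICT (by name: the statement is the Claim_ definition above) =====
set_option maxHeartbeats 1000000 in
theorem checkTestPass3_spec : Claim_equal_checkTestPass3 := by
  intro dataFilm K D _ hPre
  unfold Spec_checkTestPass3 checkTestPass3 checkTestPass3_alt
  simp only [ifTF, List.all_map, Function.id_comp]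
  congr 1
  funext c
  rw [colA_eq dataFilm c]
  have hlen : (dataFilm.map (fun row => row.getD c 0)).length = dataFilm.length := by simp
  rw [← hlen]
  apply col_eq
  exact hPre.2.2
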